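-- pv_equiv track=rewrite | github.com/markjayson13/IPEDSDB_Panel | Scripts/10_build_variable_browser.py | infer_semantic_family
-- ===== SOURCE A (Python) =====
-- def combined_metadata_text(varname: str, title: str, description: str) -> str:
--     return f"{varname or ''} {title or ''} {description or ''}".upper()
--
-- def infer_semantic_family(component_group: str, varname: str, title: str, description: str) -> str:
--     combined = combined_metadata_text(varname, title, description)
--
--     if component_group == "Institution / Directory":
--         if any(token in combined for token in ("STATE", "COUNTY", "REGION", "FIPS", "CBSA", "LATITUDE", "LONGITUDE", "DISTRICT", "LOCALE")):
--             return "Location and geography"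
--         if any(token in combined for token in ("SYSTEM", "BRANCH", "PARENT", "SYSTEM NAME")):
--             return "System affiliation"
--         if any(token in combined for token in ("HBCU", "TRIBAL", "LAND GRANT", "MEDICAL", "HOSPITAL", "POSTSECONDARY")):
--             return "Mission and institutional flags"
--         if any(token in combined for token in ("CONTROL", "SECTOR", "LEVEL", "OFFER", "DEGREE", "OPEN ADMISSIONS")):
--             return "Control and offerings"
--         return "Institution identity"
--
--     if component_group == "Admissions":
--         if any(token in combined for token in ("ACT", "SAT", "TEST")):
--             return "Test scores"
--         if any(token in combined for token in ("APPLICATION", "APPLICANT", "ADMIT", "ACCEPT", "ENROLLED")):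
--             return "Applications and admits"
--         if any(token in combined for token in ("OPEN ADMISSIONS", "SELECTIVITY", "YIELD", "ADMISSION RATE")):
--             return "Access and selectivity"
--         return "Other admissions"
--
--     if component_group == "Costs / Price":
--         if any(token in combined for token in ("ROOM", "BOARD", "RMBRD")):
--             return "Room and board"
--         if any(token in combined for token in ("APPLICATION FEE", "APPLFEE")):
--             return "Application and ancillary fees"
--         if any(token in combined for token in ("TUITION", "FEE", "REQUIRED FEES")):
--             return "Tuition and fees"
--         if any(token in combined for token in ("PRICE", "COST OF ATTENDANCE", "TOTAL COST", "CHARGE")):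
--             return "Cost of attendance"
--         return "Other price variables"
--
--     if component_group == "Student Financial Aid":
--         if "NET PRICE" in combined:
--             return "Net price and aid composition"
--         if any(token in combined for token in ("RECIPIENT", "NUMBER OF STUDENTS", "ANY AID", "RECEIVING")):
--             return "Aid recipients and take-up"
--         if any(token in combined for token in ("PELL", "FEDERAL GRANT")):
--             return "Pell and federal grants"
--         if "INSTITUTIONAL GRANT" in combined:
--             return "Institutional grants"
--         if "LOAN" in combined:
--             return "Loans"
--         return "Grant aid and packaging"
--
--     if component_group == "Enrollment / Student Profile":
--         if any(token in combined for token in ("ENROLLMENT", "HEADCOUNT", "FTE", "FULL-TIME", "PART-TIME", "FIRST-TIME", "TRANSFER")):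
--             return "Headcount and attendance"
--         if any(token in combined for token in ("RACE", "ETHNICITY", "WHITE", "BLACK", "HISPANIC", "ASIAN", "NONRESIDENT", "FOREIGN", "RESIDENT")):
--             return "Student composition"
--         if any(token in combined for token in ("RETENTION", "PERSISTENCE")):
--             return "Retention and persistence"
--         return "Other enrollment profile"
--
--     if component_group == "Completions":
--         if any(token in combined for token in ("FIELD OF STUDY", "CIP", "STEM", "MAJOR")):
--             return "Fields of study"
--         return "Awards and completions"
--
--     if component_group == "Graduation / Outcomes":
--         if any(token in combined for token in ("TRANSFER", "OUTCOME", "RETENTION")):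
--             return "Transfer and cohort outcomes"
--         return "Graduation rates"
--
--     if component_group == "Finance":
--         if "REVENUE" in combined:
--             return "Revenue"
--         if any(token in combined for token in ("EXPENSE", "EXPENDITURE", "INSTRUCTION", "ACADEMIC SUPPORT", "STUDENT SERVICES", "AUXILIARY")):
--             return "Expenditures and functional spending"
--         if any(token in combined for token in ("ASSET", "LIABILITY", "DEBT")):
--             return "Assets, liabilities, and debt"
--         if "ENDOWMENT" in combined:
--             return "Endowment and investments"
--         return "Other finance"
--
--     if component_group == "Staff / Human Resources":
--         if any(token in combined for token in ("SALARY", "PAYROLL", "WAGE")):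
--             return "Salaries and payroll"
--         if "FACULTY" in combined:
--             return "Faculty profile"
--         return "Staff counts and composition"
--
--     if component_group == "Panel-only / custom":
--         return "Panel-only / custom"
--
--     return "Custom / derived"
-- ===== SOURCE B (Python) =====
-- # Flat rule base: one (token, group, label) row per keyword, rows for a group
-- # listed in priority order.  Classification is a single backwards pass with an
-- # overwrite accumulator: starting from the group's default, every matching row
-- # (scanned lowest-priority first) overwrites the result, so the last overwrite
-- # is the highest-priority matching rule.
--
-- _DEFAULTS = {
--     "Institution / Directory": "Institution identity",
--     "Admissions": "Other admissions",
--     "Costs / Price": "Other price variables",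
--     "Student Financial Aid": "Grant aid and packaging",
--     "Enrollment / Student Profile": "Other enrollment profile",
--     "Completions": "Awards and completions",
--     "Graduation / Outcomes": "Graduation rates",
--     "Finance": "Other finance",
--     "Staff / Human Resources": "Staff counts and composition",
--     "Panel-only / custom": "Panel-only / custom",
-- }
--
-- def _rows(group, label, tokens):
--     return [(tok, group, label) for tok in tokens]
--
-- _TOKEN_RULES = (
--     _rows("Institution / Directory", "Location and geography",
--           ("STATE", "COUNTY", "REGION", "FIPS", "CBSA", "LATITUDE", "LONGITUDE", "DISTRICT", "LOCALE"))
--     + _rows("Institution / Directory", "System affiliation",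
--             ("SYSTEM", "BRANCH", "PARENT", "SYSTEM NAME"))
--     + _rows("Institution / Directory", "Mission and institutional flags",
--             ("HBCU", "TRIBAL", "LAND GRANT", "MEDICAL", "HOSPITAL", "POSTSECONDARY"))
--     + _rows("Institution / Directory", "Control and offerings",
--             ("CONTROL", "SECTOR", "LEVEL", "OFFER", "DEGREE", "OPEN ADMISSIONS"))
--     + _rows("Admissions", "Test scores", ("ACT", "SAT", "TEST"))
--     + _rows("Admissions", "Applications and admits",
--             ("APPLICATION", "APPLICANT", "ADMIT", "ACCEPT", "ENROLLED"))
--     + _rows("Admissions", "Access and selectivity",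
--             ("OPEN ADMISSIONS", "SELECTIVITY", "YIELD", "ADMISSION RATE"))
--     + _rows("Costs / Price", "Room and board", ("ROOM", "BOARD", "RMBRD"))
--     + _rows("Costs / Price", "Application and ancillary fees", ("APPLICATION FEE", "APPLFEE"))
--     + _rows("Costs / Price", "Tuition and fees", ("TUITION", "FEE", "REQUIRED FEES"))
--     + _rows("Costs / Price", "Cost of attendance",
--             ("PRICE", "COST OF ATTENDANCE", "TOTAL COST", "CHARGE"))
--     + _rows("Student Financial Aid", "Net price and aid composition", ("NET PRICE",))
--     + _rows("Student Financial Aid", "Aid recipients and take-up",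
--             ("RECIPIENT", "NUMBER OF STUDENTS", "ANY AID", "RECEIVING"))
--     + _rows("Student Financial Aid", "Pell and federal grants", ("PELL", "FEDERAL GRANT"))
--     + _rows("Student Financial Aid", "Institutional grants", ("INSTITUTIONAL GRANT",))
--     + _rows("Student Financial Aid", "Loans", ("LOAN",))
--     + _rows("Enrollment / Student Profile", "Headcount and attendance",
--             ("ENROLLMENT", "HEADCOUNT", "FTE", "FULL-TIME", "PART-TIME", "FIRST-TIME", "TRANSFER"))
--     + _rows("Enrollment / Student Profile", "Student composition",
--             ("RACE", "ETHNICITY", "WHITE", "BLACK", "HISPANIC", "ASIAN", "NONRESIDENT", "FOREIGN", "RESIDENT"))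
--     + _rows("Enrollment / Student Profile", "Retention and persistence",
--             ("RETENTION", "PERSISTENCE"))
--     + _rows("Completions", "Fields of study", ("FIELD OF STUDY", "CIP", "STEM", "MAJOR"))
--     + _rows("Graduation / Outcomes", "Transfer and cohort outcomes",
--             ("TRANSFER", "OUTCOME", "RETENTION"))
--     + _rows("Finance", "Revenue", ("REVENUE",))
--     + _rows("Finance", "Expenditures and functional spending",
--             ("EXPENSE", "EXPENDITURE", "INSTRUCTION", "ACADEMIC SUPPORT", "STUDENT SERVICES", "AUXILIARY"))
--     + _rows("Finance", "Assets, liabilities, and debt", ("ASSET", "LIABILITY", "DEBT"))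
--     + _rows("Finance", "Endowment and investments", ("ENDOWMENT",))
--     + _rows("Staff / Human Resources", "Salaries and payroll", ("SALARY", "PAYROLL", "WAGE"))
--     + _rows("Staff / Human Resources", "Faculty profile", ("FACULTY",))
-- )
--
-- def infer_semantic_family(component_group: str, varname: str, title: str, description: str) -> str:
--     if component_group not in _DEFAULTS:
--         return "Custom / derived"
--     combined = f"{varname or ''} {title or ''} {description or ''}".upper()
--     result = _DEFAULTS[component_group]
--     for token, group, label in reversed(_TOKEN_RULES):
--         if group == component_group and token in combined:
--             result = label
--     return result
-- ===== Notes on version B (the rewrite author's own statement) =====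
-- stated objective: alternative
-- what changed: Replaces A's nested per-group if-chain (with early returns per rule block) by a flat knowledge base of (token, group, label) triples scanned once back-to-front with an overwrite accumulator, so the highest-priority matching token's label survives; unknown groups are a dict-membership pre-check.
import Mathlib
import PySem

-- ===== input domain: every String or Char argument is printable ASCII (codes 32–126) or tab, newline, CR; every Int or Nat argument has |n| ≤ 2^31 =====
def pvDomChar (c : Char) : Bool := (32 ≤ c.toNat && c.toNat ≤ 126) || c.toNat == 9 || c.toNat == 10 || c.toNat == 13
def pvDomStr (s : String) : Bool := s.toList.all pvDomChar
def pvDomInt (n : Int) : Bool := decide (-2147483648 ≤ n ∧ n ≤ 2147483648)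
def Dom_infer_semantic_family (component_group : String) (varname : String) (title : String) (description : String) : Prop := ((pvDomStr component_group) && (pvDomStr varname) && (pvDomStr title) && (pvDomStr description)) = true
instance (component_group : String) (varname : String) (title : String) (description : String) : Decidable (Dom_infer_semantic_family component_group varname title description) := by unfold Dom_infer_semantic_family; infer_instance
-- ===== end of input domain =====

-- B replaces A's nested per-group if-chain by a flat knowledge base of (token, group, label)
-- triples folded back-to-front with an overwrite accumulator; objective: alternative
-- (a different data structure and loop shape, same cost).

-- ===== PORT A =====
-- 's or ""' on a Python str: s if non-empty, else ""
def pvOrEmpty (s : String) : String := if s = "" then "" else s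

-- f"{varname or ''} {title or ''} {description or ''}".upper()
def combined_metadata_text (varname : String) (title : String) (description : String) : String :=
  PySem.Str.upper (PySem.Str.join " " [pvOrEmpty varname, pvOrEmpty title, pvOrEmpty description])

def infer_semantic_family (component_group : String) (varname : String) (title : String) (description : String) : String :=
  let combined := combined_metadata_text varname title description
  if component_group = "Institution / Directory" then
    if ["STATE", "COUNTY", "REGION", "FIPS", "CBSA", "LATITUDE", "LONGITUDE", "DISTRICT", "LOCALE"].any (fun token => PySem.Str.isIn token combined) then "Location and geography"
    else if ["SYSTEM", "BRANCH", "PARENT", "SYSTEM NAME"].any (fun token => PySem.Str.isIn token combined) then "System affiliation"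
    else if ["HBCU", "TRIBAL", "LAND GRANT", "MEDICAL", "HOSPITAL", "POSTSECONDARY"].any (fun token => PySem.Str.isIn token combined) then "Mission and institutional flags"
    else if ["CONTROL", "SECTOR", "LEVEL", "OFFER", "DEGREE", "OPEN ADMISSIONS"].any (fun token => PySem.Str.isIn token combined) then "Control and offerings"
    else "Institution identity"
  else if component_group = "Admissions" then
    if ["ACT", "SAT", "TEST"].any (fun token => PySem.Str.isIn token combined) then "Test scores"
    else if ["APPLICATION", "APPLICANT", "ADMIT", "ACCEPT", "ENROLLED"].any (fun token => PySem.Str.isIn token combined) then "Applications and admits"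
    else if ["OPEN ADMISSIONS", "SELECTIVITY", "YIELD", "ADMISSION RATE"].any (fun token => PySem.Str.isIn token combined) then "Access and selectivity"
    else "Other admissions"
  else if component_group = "Costs / Price" then
    if ["ROOM", "BOARD", "RMBRD"].any (fun token => PySem.Str.isIn token combined) then "Room and board"
    else if ["APPLICATION FEE", "APPLFEE"].any (fun token => PySem.Str.isIn token combined) then "Application and ancillary fees"
    else if ["TUITION", "FEE", "REQUIRED FEES"].any (fun token => PySem.Str.isIn token combined) then "Tuition and fees"
    else if ["PRICE", "COST OF ATTENDANCE", "TOTAL COST", "CHARGE"].any (fun token => PySem.Str.isIn token combined) then "Cost of attendance"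
    else "Other price variables"
  else if component_group = "Student Financial Aid" then
    if PySem.Str.isIn "NET PRICE" combined then "Net price and aid composition"
    else if ["RECIPIENT", "NUMBER OF STUDENTS", "ANY AID", "RECEIVING"].any (fun token => PySem.Str.isIn token combined) then "Aid recipients and take-up"
    else if ["PELL", "FEDERAL GRANT"].any (fun token => PySem.Str.isIn token combined) then "Pell and federal grants"
    else if PySem.Str.isIn "INSTITUTIONAL GRANT" combined then "Institutional grants"
    else if PySem.Str.isIn "LOAN" combined then "Loans"
    else "Grant aid and packaging"
  else if component_group = "Enrollment / Student Profile" then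
    if ["ENROLLMENT", "HEADCOUNT", "FTE", "FULL-TIME", "PART-TIME", "FIRST-TIME", "TRANSFER"].any (fun token => PySem.Str.isIn token combined) then "Headcount and attendance"
    else if ["RACE", "ETHNICITY", "WHITE", "BLACK", "HISPANIC", "ASIAN", "NONRESIDENT", "FOREIGN", "RESIDENT"].any (fun token => PySem.Str.isIn token combined) then "Student composition"
    else if ["RETENTION", "PERSISTENCE"].any (fun token => PySem.Str.isIn token combined) then "Retention and persistence"
    else "Other enrollment profile"
  else if component_group = "Completions" then
    if ["FIELD OF STUDY", "CIP", "STEM", "MAJOR"].any (fun token => PySem.Str.isIn token combined) then "Fields of study"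
    else "Awards and completions"
  else if component_group = "Graduation / Outcomes" then
    if ["TRANSFER", "OUTCOME", "RETENTION"].any (fun token => PySem.Str.isIn token combined) then "Transfer and cohort outcomes"
    else "Graduation rates"
  else if component_group = "Finance" then
    if PySem.Str.isIn "REVENUE" combined then "Revenue"
    else if ["EXPENSE", "EXPENDITURE", "INSTRUCTION", "ACADEMIC SUPPORT", "STUDENT SERVICES", "AUXILIARY"].any (fun token => PySem.Str.isIn token combined) then "Expenditures and functional spending"
    else if ["ASSET", "LIABILITY", "DEBT"].any (fun token => PySem.Str.isIn token combined) then "Assets, liabilities, and debt"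
    else if PySem.Str.isIn "ENDOWMENT" combined then "Endowment and investments"
    else "Other finance"
  else if component_group = "Staff / Human Resources" then
    if ["SALARY", "PAYROLL", "WAGE"].any (fun token => PySem.Str.isIn token combined) then "Salaries and payroll"
    else if PySem.Str.isIn "FACULTY" combined then "Faculty profile"
    else "Staff counts and composition"
  else if component_group = "Panel-only / custom" then "Panel-only / custom"
  else "Custom / derived"

-- ===== PORT B =====
-- Source B's _DEFAULTS dict
def pvDefaults : PySem.Dict String String := PySem.Dict.mk
  [ ("Institution / Directory", "Institution identity"),
    ("Admissions", "Other admissions"),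
    ("Costs / Price", "Other price variables"),
    ("Student Financial Aid", "Grant aid and packaging"),
    ("Enrollment / Student Profile", "Other enrollment profile"),
    ("Completions", "Awards and completions"),
    ("Graduation / Outcomes", "Graduation rates"),
    ("Finance", "Other finance"),
    ("Staff / Human Resources", "Staff counts and composition"),
    ("Panel-only / custom", "Panel-only / custom") ]

-- Source B's helper _rows: one (token, group, label) triple per token
def pvRows (group : String) (label : String) (tokens : List String) : List (String × String × String) :=
  tokens.map (fun tok => (tok, group, label))

-- Source B's flat rule base _TOKEN_RULES
def pvTokenRules : List (String × String × String) :=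
  pvRows "Institution / Directory" "Location and geography" ["STATE", "COUNTY", "REGION", "FIPS", "CBSA", "LATITUDE", "LONGITUDE", "DISTRICT", "LOCALE"]
  ++ pvRows "Institution / Directory" "System affiliation" ["SYSTEM", "BRANCH", "PARENT", "SYSTEM NAME"]
  ++ pvRows "Institution / Directory" "Mission and institutional flags" ["HBCU", "TRIBAL", "LAND GRANT", "MEDICAL", "HOSPITAL", "POSTSECONDARY"]
  ++ pvRows "Institution / Directory" "Control and offerings" ["CONTROL", "SECTOR", "LEVEL", "OFFER", "DEGREE", "OPEN ADMISSIONS"]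
  ++ pvRows "Admissions" "Test scores" ["ACT", "SAT", "TEST"]
  ++ pvRows "Admissions" "Applications and admits" ["APPLICATION", "APPLICANT", "ADMIT", "ACCEPT", "ENROLLED"]
  ++ pvRows "Admissions" "Access and selectivity" ["OPEN ADMISSIONS", "SELECTIVITY", "YIELD", "ADMISSION RATE"]
  ++ pvRows "Costs / Price" "Room and board" ["ROOM", "BOARD", "RMBRD"]
  ++ pvRows "Costs / Price" "Application and ancillary fees" ["APPLICATION FEE", "APPLFEE"]
  ++ pvRows "Costs / Price" "Tuition and fees" ["TUITION", "FEE", "REQUIRED FEES"]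
  ++ pvRows "Costs / Price" "Cost of attendance" ["PRICE", "COST OF ATTENDANCE", "TOTAL COST", "CHARGE"]
  ++ pvRows "Student Financial Aid" "Net price and aid composition" ["NET PRICE"]
  ++ pvRows "Student Financial Aid" "Aid recipients and take-up" ["RECIPIENT", "NUMBER OF STUDENTS", "ANY AID", "RECEIVING"]
  ++ pvRows "Student Financial Aid" "Pell and federal grants" ["PELL", "FEDERAL GRANT"]
  ++ pvRows "Student Financial Aid" "Institutional grants" ["INSTITUTIONAL GRANT"]
  ++ pvRows "Student Financial Aid" "Loans" ["LOAN"]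
  ++ pvRows "Enrollment / Student Profile" "Headcount and attendance" ["ENROLLMENT", "HEADCOUNT", "FTE", "FULL-TIME", "PART-TIME", "FIRST-TIME", "TRANSFER"]
  ++ pvRows "Enrollment / Student Profile" "Student composition" ["RACE", "ETHNICITY", "WHITE", "BLACK", "HISPANIC", "ASIAN", "NONRESIDENT", "FOREIGN", "RESIDENT"]
  ++ pvRows "Enrollment / Student Profile" "Retention and persistence" ["RETENTION", "PERSISTENCE"]
  ++ pvRows "Completions" "Fields of study" ["FIELD OF STUDY", "CIP", "STEM", "MAJOR"]
  ++ pvRows "Graduation / Outcomes" "Transfer and cohort outcomes" ["TRANSFER", "OUTCOME", "RETENTION"]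
  ++ pvRows "Finance" "Revenue" ["REVENUE"]
  ++ pvRows "Finance" "Expenditures and functional spending" ["EXPENSE", "EXPENDITURE", "INSTRUCTION", "ACADEMIC SUPPORT", "STUDENT SERVICES", "AUXILIARY"]
  ++ pvRows "Finance" "Assets, liabilities, and debt" ["ASSET", "LIABILITY", "DEBT"]
  ++ pvRows "Finance" "Endowment and investments" ["ENDOWMENT"]
  ++ pvRows "Staff / Human Resources" "Salaries and payroll" ["SALARY", "PAYROLL", "WAGE"]
  ++ pvRows "Staff / Human Resources" "Faculty profile" ["FACULTY"]

-- Source B's loop: 'for token, group, label in reversed(_TOKEN_RULES): if … : result = label'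
def infer_semantic_family_alt (component_group : String) (varname : String) (title : String) (description : String) : String :=
  match pvDefaults.get? component_group with
  | none => "Custom / derived"
  | some dflt =>
      let combined := PySem.Str.upper (PySem.Str.join " " [pvOrEmpty varname, pvOrEmpty title, pvOrEmpty description])
      pvTokenRules.reverse.foldl
        (fun result r =>
          if r.2.1 == component_group && PySem.Str.isIn r.1 combined then r.2.2 else result)
        dflt

-- ===== PRECONDITION & SPEC =====
def Spec_infer_semantic_family (component_group : String) (varname : String) (title : String) (description : String) (out : String) : Prop := out = infer_semantic_family_alt component_group varname title description
instance (component_group : String) (varname : String) (title : String) (description : String) (out : String) : Decidable (Spec_infer_semantic_family component_group varname title description out) := by unfold Spec_infer_semantic_family; infer_instance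

-- ===== CLAIM (what is proved, stated in full; the proofs are below) =====
def Claim_equal_infer_semantic_family : Prop := ∀ (component_group : String) (varname : String) (title : String) (description : String), Dom_infer_semantic_family component_group varname title description → Spec_infer_semantic_family component_group varname title description (infer_semantic_family component_group varname title description)

-- ===== LEMMAS AND PROOFS =====
-- split an 'if any-of' into a chain of single-token ifs (shape of B's fold result)
theorem pv_ite_or {α : Type} (x y : α) (b c : Bool) :
    (if (b || c) = true then x else y) = if b = true then x else if c = true then x else y := by
  cases b <;> simp

-- B's whole-list fold equals the same fold over the rows of the matched group only
theorem pv_foldr_filter (cg combined dflt : String) (l : List (String × String × String)) :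
    l.foldr (fun r acc => if r.2.1 == cg && PySem.Str.isIn r.1 combined then r.2.2 else acc) dflt
    = (l.filter (fun r => r.2.1 == cg)).foldr (fun r acc => if PySem.Str.isIn r.1 combined then r.2.2 else acc) dflt := by
  induction l with
  | nil => rfl
  | cons r rest ih =>
    cases hb : (r.2.1 == cg) with
    | true =>
      simp only [List.foldr_cons, List.filter_cons, hb, Bool.true_and, if_true, ih]
    | false =>
      simp only [List.foldr_cons, List.filter_cons, hb, Bool.false_and, Bool.false_eq_true,
        if_false, ih]

-- ===== VERDICT (by name: the statement is the Claim_ definition above) =====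
set_option maxHeartbeats 2000000 in
theorem infer_semantic_family_spec : Claim_equal_infer_semantic_family := by
  intro cg v t d _
  unfold Spec_infer_semantic_family infer_semantic_family infer_semantic_family_alt combined_metadata_text
  by_cases h1 : cg = "Institution / Directory"
  · subst h1
    have hf : pvTokenRules.filter (fun r => r.2.1 == "Institution / Directory") =
        pvRows "Institution / Directory" "Location and geography" ["STATE", "COUNTY", "REGION", "FIPS", "CBSA", "LATITUDE", "LONGITUDE", "DISTRICT", "LOCALE"]
      ++ pvRows "Institution / Directory" "System affiliation" ["SYSTEM", "BRANCH", "PARENT", "SYSTEM NAME"]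
      ++ pvRows "Institution / Directory" "Mission and institutional flags" ["HBCU", "TRIBAL", "LAND GRANT", "MEDICAL", "HOSPITAL", "POSTSECONDARY"]
      ++ pvRows "Institution / Directory" "Control and offerings" ["CONTROL", "SECTOR", "LEVEL", "OFFER", "DEGREE", "OPEN ADMISSIONS"] := by decide
    generalize (PySem.Str.upper (PySem.Str.join " " [pvOrEmpty v, pvOrEmpty t, pvOrEmpty d])) = C
    simp only [pvDefaults, PySem.Dict.get?_mk_cons, beq_iff_eq, String.reduceEq, beq_self_eq_true,
      reduceIte]
    rw [List.foldl_reverse, pv_foldr_filter, hf]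
    simp only [pvRows, List.map, List.cons_append, List.nil_append, List.foldr_cons,
      List.foldr_nil, List.any_cons, List.any_nil, Bool.or_false, pv_ite_or]
  by_cases h2 : cg = "Admissions"
  · subst h2
    have hf : pvTokenRules.filter (fun r => r.2.1 == "Admissions") =
        pvRows "Admissions" "Test scores" ["ACT", "SAT", "TEST"]
      ++ pvRows "Admissions" "Applications and admits" ["APPLICATION", "APPLICANT", "ADMIT", "ACCEPT", "ENROLLED"]
      ++ pvRows "Admissions" "Access and selectivity" ["OPEN ADMISSIONS", "SELECTIVITY", "YIELD", "ADMISSION RATE"] := by decide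
    generalize (PySem.Str.upper (PySem.Str.join " " [pvOrEmpty v, pvOrEmpty t, pvOrEmpty d])) = C
    simp only [pvDefaults, PySem.Dict.get?_mk_cons, beq_iff_eq, String.reduceEq, beq_self_eq_true,
      reduceIte]
    rw [List.foldl_reverse, pv_foldr_filter, hf]
    simp only [pvRows, List.map, List.cons_append, List.nil_append, List.foldr_cons,
      List.foldr_nil, List.any_cons, List.any_nil, Bool.or_false, pv_ite_or]
  by_cases h3 : cg = "Costs / Price"
  · subst h3
    have hf : pvTokenRules.filter (fun r => r.2.1 == "Costs / Price") =
        pvRows "Costs / Price" "Room and board" ["ROOM", "BOARD", "RMBRD"]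
      ++ pvRows "Costs / Price" "Application and ancillary fees" ["APPLICATION FEE", "APPLFEE"]
      ++ pvRows "Costs / Price" "Tuition and fees" ["TUITION", "FEE", "REQUIRED FEES"]
      ++ pvRows "Costs / Price" "Cost of attendance" ["PRICE", "COST OF ATTENDANCE", "TOTAL COST", "CHARGE"] := by decide
    generalize (PySem.Str.upper (PySem.Str.join " " [pvOrEmpty v, pvOrEmpty t, pvOrEmpty d])) = C
    simp only [pvDefaults, PySem.Dict.get?_mk_cons, beq_iff_eq, String.reduceEq, beq_self_eq_true,
      reduceIte]
    rw [List.foldl_reverse, pv_foldr_filter, hf]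
    simp only [pvRows, List.map, List.cons_append, List.nil_append, List.foldr_cons,
      List.foldr_nil, List.any_cons, List.any_nil, Bool.or_false, pv_ite_or]
  by_cases h4 : cg = "Student Financial Aid"
  · subst h4
    have hf : pvTokenRules.filter (fun r => r.2.1 == "Student Financial Aid") =
        pvRows "Student Financial Aid" "Net price and aid composition" ["NET PRICE"]
      ++ pvRows "Student Financial Aid" "Aid recipients and take-up" ["RECIPIENT", "NUMBER OF STUDENTS", "ANY AID", "RECEIVING"]
      ++ pvRows "Student Financial Aid" "Pell and federal grants" ["PELL", "FEDERAL GRANT"]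
      ++ pvRows "Student Financial Aid" "Institutional grants" ["INSTITUTIONAL GRANT"]
      ++ pvRows "Student Financial Aid" "Loans" ["LOAN"] := by decide
    generalize (PySem.Str.upper (PySem.Str.join " " [pvOrEmpty v, pvOrEmpty t, pvOrEmpty d])) = C
    simp only [pvDefaults, PySem.Dict.get?_mk_cons, beq_iff_eq, String.reduceEq, beq_self_eq_true,
      reduceIte]
    rw [List.foldl_reverse, pv_foldr_filter, hf]
    simp only [pvRows, List.map, List.cons_append, List.nil_append, List.foldr_cons,
      List.foldr_nil, List.any_cons, List.any_nil, Bool.or_false, pv_ite_or]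
  by_cases h5 : cg = "Enrollment / Student Profile"
  · subst h5
    have hf : pvTokenRules.filter (fun r => r.2.1 == "Enrollment / Student Profile") =
        pvRows "Enrollment / Student Profile" "Headcount and attendance" ["ENROLLMENT", "HEADCOUNT", "FTE", "FULL-TIME", "PART-TIME", "FIRST-TIME", "TRANSFER"]
      ++ pvRows "Enrollment / Student Profile" "Student composition" ["RACE", "ETHNICITY", "WHITE", "BLACK", "HISPANIC", "ASIAN", "NONRESIDENT", "FOREIGN", "RESIDENT"]
      ++ pvRows "Enrollment / Student Profile" "Retention and persistence" ["RETENTION", "PERSISTENCE"] := by decide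
    generalize (PySem.Str.upper (PySem.Str.join " " [pvOrEmpty v, pvOrEmpty t, pvOrEmpty d])) = C
    simp only [pvDefaults, PySem.Dict.get?_mk_cons, beq_iff_eq, String.reduceEq, beq_self_eq_true,
      reduceIte]
    rw [List.foldl_reverse, pv_foldr_filter, hf]
    simp only [pvRows, List.map, List.cons_append, List.nil_append, List.foldr_cons,
      List.foldr_nil, List.any_cons, List.any_nil, Bool.or_false, pv_ite_or]
  by_cases h6 : cg = "Completions"
  · subst h6
    have hf : pvTokenRules.filter (fun r => r.2.1 == "Completions") =
        pvRows "Completions" "Fields of study" ["FIELD OF STUDY", "CIP", "STEM", "MAJOR"] := by decide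
    generalize (PySem.Str.upper (PySem.Str.join " " [pvOrEmpty v, pvOrEmpty t, pvOrEmpty d])) = C
    simp only [pvDefaults, PySem.Dict.get?_mk_cons, beq_iff_eq, String.reduceEq, beq_self_eq_true,
      reduceIte]
    rw [List.foldl_reverse, pv_foldr_filter, hf]
    simp only [pvRows, List.map, List.cons_append, List.nil_append, List.foldr_cons,
      List.foldr_nil, List.any_cons, List.any_nil, Bool.or_false, pv_ite_or]
  by_cases h7 : cg = "Graduation / Outcomes"
  · subst h7
    have hf : pvTokenRules.filter (fun r => r.2.1 == "Graduation / Outcomes") =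
        pvRows "Graduation / Outcomes" "Transfer and cohort outcomes" ["TRANSFER", "OUTCOME", "RETENTION"] := by decide
    generalize (PySem.Str.upper (PySem.Str.join " " [pvOrEmpty v, pvOrEmpty t, pvOrEmpty d])) = C
    simp only [pvDefaults, PySem.Dict.get?_mk_cons, beq_iff_eq, String.reduceEq, beq_self_eq_true,
      reduceIte]
    rw [List.foldl_reverse, pv_foldr_filter, hf]
    simp only [pvRows, List.map, List.cons_append, List.nil_append, List.foldr_cons,
      List.foldr_nil, List.any_cons, List.any_nil, Bool.or_false, pv_ite_or]
  by_cases h8 : cg = "Finance"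
  · subst h8
    have hf : pvTokenRules.filter (fun r => r.2.1 == "Finance") =
        pvRows "Finance" "Revenue" ["REVENUE"]
      ++ pvRows "Finance" "Expenditures and functional spending" ["EXPENSE", "EXPENDITURE", "INSTRUCTION", "ACADEMIC SUPPORT", "STUDENT SERVICES", "AUXILIARY"]
      ++ pvRows "Finance" "Assets, liabilities, and debt" ["ASSET", "LIABILITY", "DEBT"]
      ++ pvRows "Finance" "Endowment and investments" ["ENDOWMENT"] := by decide
    generalize (PySem.Str.upper (PySem.Str.join " " [pvOrEmpty v, pvOrEmpty t, pvOrEmpty d])) = C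
    simp only [pvDefaults, PySem.Dict.get?_mk_cons, beq_iff_eq, String.reduceEq, beq_self_eq_true,
      reduceIte]
    rw [List.foldl_reverse, pv_foldr_filter, hf]
    simp only [pvRows, List.map, List.cons_append, List.nil_append, List.foldr_cons,
      List.foldr_nil, List.any_cons, List.any_nil, Bool.or_false, pv_ite_or]
  by_cases h9 : cg = "Staff / Human Resources"
  · subst h9
    have hf : pvTokenRules.filter (fun r => r.2.1 == "Staff / Human Resources") =
        pvRows "Staff / Human Resources" "Salaries and payroll" ["SALARY", "PAYROLL", "WAGE"]
      ++ pvRows "Staff / Human Resources" "Faculty profile" ["FACULTY"] := by decide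
    generalize (PySem.Str.upper (PySem.Str.join " " [pvOrEmpty v, pvOrEmpty t, pvOrEmpty d])) = C
    simp only [pvDefaults, PySem.Dict.get?_mk_cons, beq_iff_eq, String.reduceEq, beq_self_eq_true,
      reduceIte]
    rw [List.foldl_reverse, pv_foldr_filter, hf]
    simp only [pvRows, List.map, List.cons_append, List.nil_append, List.foldr_cons,
      List.foldr_nil, List.any_cons, List.any_nil, Bool.or_false, pv_ite_or]
  by_cases h10 : cg = "Panel-only / custom"
  · subst h10
    have hf : pvTokenRules.filter (fun r => r.2.1 == "Panel-only / custom") = [] := by decide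
    simp only [pvDefaults, PySem.Dict.get?_mk_cons, beq_iff_eq, String.reduceEq, beq_self_eq_true,
      reduceIte]
    rw [List.foldl_reverse, pv_foldr_filter, hf]
    rfl
  simp only [if_neg h1, if_neg h2, if_neg h3, if_neg h4, if_neg h5, if_neg h6, if_neg h7,
    if_neg h8, if_neg h9, if_neg h10, pvDefaults, PySem.Dict.get?_mk_cons, beq_iff_eq]
  rw [if_neg (fun h => h1 h.symm), if_neg (fun h => h2 h.symm), if_neg (fun h => h3 h.symm),
    if_neg (fun h => h4 h.symm), if_neg (fun h => h5 h.symm), if_neg (fun h => h6 h.symm),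
    if_neg (fun h => h7 h.symm), if_neg (fun h => h8 h.symm), if_neg (fun h => h9 h.symm),
    if_neg (fun h => h10 h.symm)]
  rfl
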